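-- pv_equiv track=rewrite | github.com/thedinaiym/-Virtual-Makeup-Artist-Public | src/models/generator.py | _enc_channels
-- ===== SOURCE A (Python) =====
-- def _enc_channels(in_ch, base_f, num_downs):
--     channels = []
--     ch = in_ch
--     for i in range(num_downs):
--         out = base_f if i == 0 else min(channels[-1] * 2, 512)
--         channels.append(out)
--         ch = out
--     return channels
-- ===== SOURCE B (Python) =====
-- def _enc_channels(in_ch, base_f, num_downs):
--     # closed form: layer i has channels min(base_f * 2**i, 512); layer 0 is base_f uncapped.
--     # For positive base_f the cap is reached by i = 10 (base_f * 2**10 >= 1024 > 512),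
--     # so we return 512 directly there instead of evaluating a huge power.
--     def ch(i):
--         if i == 0:
--             return base_f
--         if base_f > 0 and i >= 10:
--             return 512
--         return min(base_f * 2 ** i, 512)
--     return [ch(i) for i in range(num_downs)]
-- ===== Notes on version B (the rewrite author's own statement) =====
-- stated objective: simpler
-- what changed: Replaces the stateful accumulating loop (each channel doubled from the previous list element with a 512 cap) by a closed-form comprehension computing each channel independently as min(base_f * 2**i, 512) (layer 0 stays base_f uncapped), with a direct 512 return once base_f > 0 and i >= 10 guarantees saturation, so no list state and no big-power evaluation.
import Mathlib
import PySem

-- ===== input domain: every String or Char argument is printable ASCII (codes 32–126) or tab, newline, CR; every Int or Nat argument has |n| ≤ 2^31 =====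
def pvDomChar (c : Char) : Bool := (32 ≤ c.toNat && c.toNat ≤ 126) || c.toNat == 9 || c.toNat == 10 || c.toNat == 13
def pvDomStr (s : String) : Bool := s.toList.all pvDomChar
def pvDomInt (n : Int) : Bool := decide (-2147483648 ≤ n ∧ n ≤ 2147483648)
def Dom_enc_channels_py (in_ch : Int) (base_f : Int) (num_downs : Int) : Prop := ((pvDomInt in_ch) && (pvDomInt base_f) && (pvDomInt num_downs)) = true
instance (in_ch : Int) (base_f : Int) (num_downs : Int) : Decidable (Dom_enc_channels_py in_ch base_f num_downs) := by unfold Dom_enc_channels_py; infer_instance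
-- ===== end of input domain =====

-- B replaces A's stateful doubling loop by a closed-form comprehension min(base_f * 2**i, 512); simpler, same result.


-- ===== PORT A =====
-- fold state = (channels, ch); channels[-1] via pyGet? (always some on the branch where it is read,
-- since i ≥ 1 implies channels is nonempty; .getD 0 only discharges the unreachable none)
def enc_channels_py (in_ch : Int) (base_f : Int) (num_downs : Int) : List Int :=
  ((PySem.List.pyRange 0 num_downs 1).foldl
    (fun (st : List Int × Int) i =>
      let out := if i == 0 then base_f else min ((PySem.List.pyGet? st.1 (-1)).getD 0 * 2) 512
      (st.1 ++ [out], out)) ([], in_ch)).1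

-- ===== PORT B =====
-- i ranges over 0..num_downs-1 so i ≥ 0 and 2**i = 2 ^ i.toNat exactly;
-- the 'base_f > 0 and i >= 10' saturation short-circuit is Source B's, ported as written
def enc_channels_py_alt (in_ch : Int) (base_f : Int) (num_downs : Int) : List Int :=
  (PySem.List.pyRange 0 num_downs 1).map
    (fun i => if i == 0 then base_f
      else if 0 < base_f ∧ 10 ≤ i then 512
      else min (base_f * 2 ^ i.toNat) 512)

-- ===== PRECONDITION & SPEC =====
def Spec_enc_channels_py (in_ch : Int) (base_f : Int) (num_downs : Int) (out : List Int) : Prop := out = enc_channels_py_alt in_ch base_f num_downs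
instance (in_ch : Int) (base_f : Int) (num_downs : Int) (out : List Int) : Decidable (Spec_enc_channels_py in_ch base_f num_downs out) := by unfold Spec_enc_channels_py; infer_instance

-- ===== CLAIM (what is proved, stated in full; the proofs are below) =====
def Claim_equal_enc_channels_py : Prop := ∀ (in_ch : Int) (base_f : Int) (num_downs : Int), Dom_enc_channels_py in_ch base_f num_downs → Spec_enc_channels_py in_ch base_f num_downs (enc_channels_py in_ch base_f num_downs)

-- ===== LEMMAS AND PROOFS =====

-- closed form of one layer, over Nat index
def pvG (base_f : Int) (k : Nat) : Int := if k = 0 then base_f else min (base_f * 2 ^ k) 512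

lemma pv_min_step (x : Int) : min (min x 512 * 2) 512 = min (x * 2) 512 := by omega

lemma pvG_succ (base_f : Int) (m : Nat) :
    min (pvG base_f m * 2) 512 = pvG base_f (m + 1) := by
  unfold pvG
  rcases Nat.eq_zero_or_pos m with h | h
  · subst h; simp
  · rw [if_neg (by omega), if_neg (by omega), pv_min_step, pow_succ]
    ring_nf

lemma pv_last_map_range (f : Nat → Int) (m : Nat) (hm : 0 < m) :
    PySem.List.pyGet? ((List.range m).map f) (-1) = some (f (m - 1)) := by
  obtain ⟨k, rfl⟩ : ∃ k, m = k + 1 := ⟨m - 1, by omega⟩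
  rw [PySem.List.pyGet?_neg_one, List.range_succ, List.map_append]
  simp

lemma pvB_elem (base_f : Int) (k : Nat) :
    (if ((k : Int) == 0) = true then base_f
     else if 0 < base_f ∧ 10 ≤ (k : Int) then 512
     else min (base_f * 2 ^ ((k : Int)).toNat) 512)
      = pvG base_f k := by
  unfold pvG
  simp only [Int.toNat_natCast]
  rcases Nat.eq_zero_or_pos k with h | h
  · subst h; simp
  · have h0 : ((k : Int) == 0) = false := by
      simp only [beq_eq_false_iff_ne, ne_eq, Int.natCast_eq_zero]; omega
    rw [h0]
    simp only [Bool.false_eq_true, if_false, if_neg h.ne']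
    by_cases hs : 0 < base_f ∧ 10 ≤ (k : Int)
    · rw [if_pos hs]
      have h2 : (512 : Int) ≤ base_f * 2 ^ k := by
        have hk : (2 : Int) ^ 10 ≤ 2 ^ k :=
          pow_le_pow_right₀ (by norm_num) (by omega)
        have hb : (1 : Int) ≤ base_f := hs.1
        nlinarith [pow_pos (by norm_num : (0:Int) < 2) k]
      omega
    · rw [if_neg hs]

lemma pv_fold_invariant (base_f in_ch : Int) (m : Nat) :
    (List.range m).foldl
      (fun (st : List Int × Int) (k : Nat) =>
        let out := if ((k : Int) == 0) = true then base_f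
                   else min ((PySem.List.pyGet? st.1 (-1)).getD 0 * 2) 512
        (st.1 ++ [out], out)) ([], in_ch)
    = ((List.range m).map (pvG base_f),
        if m = 0 then in_ch else pvG base_f (m - 1)) := by
  induction m with
  | zero => simp
  | succ n ih =>
    rw [List.range_succ, List.foldl_append, ih, List.map_append]
    simp only [List.foldl_cons, List.foldl_nil, List.map_cons, List.map_nil]
    rcases Nat.eq_zero_or_pos n with h | h
    · subst h; simp [pvG]
    · have hlast := pv_last_map_range (pvG base_f) n h
      have hne : ((n : Int) == 0) = false := by
        simp only [beq_eq_false_iff_ne, ne_eq, Int.natCast_eq_zero]; omega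
      have hstep : min (pvG base_f (n - 1) * 2) 512 = pvG base_f n := by
        have := pvG_succ base_f (n - 1); rwa [Nat.sub_add_cancel h] at this
      simp only [hlast, hne, Bool.false_eq_true, if_false, Option.getD_some,
        hstep, Nat.add_sub_cancel]
      rw [if_neg (Nat.succ_ne_zero n)]

-- ===== VERDICT (by name: the statement is the Claim_ definition above) =====
theorem enc_channels_py_spec : Claim_equal_enc_channels_py := by
  intro in_ch base_f num_downs _
  unfold Spec_enc_channels_py enc_channels_py enc_channels_py_alt
  rw [PySem.List.pyRange_one]
  simp only [sub_zero, zero_add]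
  rw [List.foldl_map]
  refine (congrArg Prod.fst (pv_fold_invariant base_f in_ch num_downs.toNat)).trans ?_
  rw [List.map_map]
  exact List.map_congr_left fun k _ => (pvB_elem base_f k).symm
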